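-- pv_equiv track=rewrite | github.com/wilmurillo-ai/Design-Assistant | .skills/openclaw-skills/skills/michealxie001/oc-codebase-intelligence/scripts/diagram.py | _get_module_color
-- ===== SOURCE A (Python) =====
-- from typing import Dict, List, Optional, Set, Tuple
--
-- def _get_module_color(extensions: Set[str]) -> str:
--     """Get color for module based on file types"""
--     if '.py' in extensions:
--         return '#3776ab'  # Python blue
--     elif any(e in extensions for e in ['.js', '.ts']):
--         return '#f7df1e'  # JavaScript yellow
--     elif '.go' in extensions:
--         return '#00add8'  # Go cyan
--     elif '.rs' in extensions:
--         return '#dea584'  # Rust brown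
--     elif '.java' in extensions:
--         return '#b07219'  # Java brown
--     else:
--         return '#cccccc'  # Gray
-- ===== SOURCE B (Python) =====
-- _PRIORITY = {
--     '.py': (0, '#3776ab'),
--     '.js': (1, '#f7df1e'),
--     '.ts': (1, '#f7df1e'),
--     '.go': (2, '#00add8'),
--     '.rs': (3, '#dea584'),
--     '.java': (4, '#b07219'),
-- }
--
-- def _get_module_color(extensions):
--     """Get color for module based on file types"""
--     best = None
--     for e in extensions:
--         p = _PRIORITY.get(e)
--         if p is not None and (best is None or p[0] < best[0]):
--             best = p
--     return best[1] if best is not None else '#cccccc'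
-- ===== Notes on version B (the rewrite author's own statement) =====
-- stated objective: alternative
-- what changed: Instead of testing each rule's extensions against the set in priority order, B scans the input elements once, looks each up in a priority/color map, and keeps the minimum-priority hit.
import Mathlib
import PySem

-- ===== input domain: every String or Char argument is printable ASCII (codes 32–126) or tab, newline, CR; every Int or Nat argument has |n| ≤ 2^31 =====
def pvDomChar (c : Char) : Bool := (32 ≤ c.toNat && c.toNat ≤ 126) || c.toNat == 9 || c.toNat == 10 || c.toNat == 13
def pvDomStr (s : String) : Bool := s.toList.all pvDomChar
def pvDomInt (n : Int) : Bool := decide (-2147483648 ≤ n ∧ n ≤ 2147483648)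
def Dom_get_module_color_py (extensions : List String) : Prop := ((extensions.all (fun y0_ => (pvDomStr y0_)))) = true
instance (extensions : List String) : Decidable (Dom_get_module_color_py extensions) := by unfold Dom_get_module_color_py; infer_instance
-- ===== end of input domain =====

-- B replaces A's ordered rule tests with a single pass over the input keeping the minimum-priority map hit (objective: alternative).


-- ===== PORT A =====
def get_module_color_py (extensions : List String) : String :=
  if ".py" ∈ extensions then "#3776ab"
  else if [".js", ".ts"].any (fun e => decide (e ∈ extensions)) then "#f7df1e"
  else if ".go" ∈ extensions then "#00add8"
  else if ".rs" ∈ extensions then "#dea584"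
  else if ".java" ∈ extensions then "#b07219"
  else "#cccccc"

-- ===== PORT B =====
def pvPriority : PySem.Dict String (Int × String) :=
  PySem.Dict.ofList
    [(".py", ((0 : Int), "#3776ab")), (".js", (1, "#f7df1e")), (".ts", (1, "#f7df1e")),
     (".go", (2, "#00add8")), (".rs", (3, "#dea584")), (".java", (4, "#b07219"))]

def pvStep (best : Option (Int × String)) (e : String) : Option (Int × String) :=
  match PySem.Dict.get? pvPriority e with
  | none => best
  | some p =>
    match best with
    | none => some p
    | some b => if p.1 < b.1 then some p else some b

def get_module_color_py_alt (extensions : List String) : String :=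
  match extensions.foldl pvStep none with
  | some b => b.2
  | none => "#cccccc"

-- ===== PRECONDITION & SPEC =====
def Spec_get_module_color_py (extensions : List String) (out : String) : Prop := out = get_module_color_py_alt extensions
instance (extensions : List String) (out : String) : Decidable (Spec_get_module_color_py extensions out) := by unfold Spec_get_module_color_py; infer_instance

-- ===== CLAIM (what is proved, stated in full; the proofs are below) =====
def Claim_equal_get_module_color_py : Prop := ∀ (extensions : List String), Dom_get_module_color_py extensions → Spec_get_module_color_py extensions (get_module_color_py extensions)

-- ===== LEMMAS AND PROOFS =====

-- closed form of B's fold: the minimum-priority entry among the recognised extensions present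
def pvBest (xs : List String) : Option (Int × String) :=
  if ".py" ∈ xs then some (0, "#3776ab")
  else if ".js" ∈ xs ∨ ".ts" ∈ xs then some (1, "#f7df1e")
  else if ".go" ∈ xs then some (2, "#00add8")
  else if ".rs" ∈ xs then some (3, "#dea584")
  else if ".java" ∈ xs then some (4, "#b07219")
  else none

def pvCombine (a b : Option (Int × String)) : Option (Int × String) :=
  match a, b with
  | none, b => b
  | some a, none => some a
  | some a, some b => if b.1 < a.1 then some b else some a

lemma pvStep_eq (acc : Option (Int × String)) (e : String) :
    pvStep acc e = pvCombine acc (pvStep none e) := by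
  unfold pvStep pvCombine
  cases h : PySem.Dict.get? pvPriority e <;> cases acc <;> simp

lemma pvCombine_assoc (a b c : Option (Int × String)) :
    pvCombine (pvCombine a b) c = pvCombine a (pvCombine b c) := by
  rcases a with _ | x
  · rfl
  rcases b with _ | y
  · rfl
  rcases c with _ | z
  · by_cases h : y.1 < x.1 <;> simp [pvCombine, h]
  · by_cases h1 : y.1 < x.1 <;> by_cases h2 : z.1 < y.1 <;> by_cases h3 : z.1 < x.1 <;>
      simp [pvCombine, h1, h2, h3] <;> omega

lemma foldl_pvStep_eq (xs : List String) (acc : Option (Int × String)) :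
    xs.foldl pvStep acc = pvCombine acc (xs.foldl pvStep none) := by
  induction xs generalizing acc with
  | nil => cases acc <;> simp [pvCombine]
  | cons x xs ih =>
    simp only [List.foldl_cons]
    rw [ih (pvStep acc x), ih (pvStep none x), pvStep_eq acc x, pvCombine_assoc]

lemma foldl_pvStep_closed (xs : List String) : xs.foldl pvStep none = pvBest xs := by
  induction xs with
  | nil => simp [pvBest]
  | cons x xs ih =>
    simp only [List.foldl_cons]
    rw [foldl_pvStep_eq, ih]
    by_cases h1 : x = ".py"
    · subst h1
      rw [show pvStep none ".py" = some (0, "#3776ab") from by decide]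
      unfold pvBest
      simp only [List.mem_cons]
      simp only [true_or, if_true]
      split_ifs <;> simp [pvCombine]
    by_cases h2 : x = ".js"
    · subst h2
      rw [show pvStep none ".js" = some (1, "#f7df1e") from by decide]
      unfold pvBest
      simp [List.mem_cons]
      split_ifs <;> simp [pvCombine]
    by_cases h3 : x = ".ts"
    · subst h3
      rw [show pvStep none ".ts" = some (1, "#f7df1e") from by decide]
      unfold pvBest
      simp [List.mem_cons]
      split_ifs <;> simp [pvCombine]
    by_cases h4 : x = ".go"
    · subst h4
      rw [show pvStep none ".go" = some (2, "#00add8") from by decide]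
      unfold pvBest
      simp [List.mem_cons]
      split_ifs <;> simp [pvCombine]
    by_cases h5 : x = ".rs"
    · subst h5
      rw [show pvStep none ".rs" = some (3, "#dea584") from by decide]
      unfold pvBest
      simp [List.mem_cons]
      split_ifs <;> simp [pvCombine]
    by_cases h6 : x = ".java"
    · subst h6
      rw [show pvStep none ".java" = some (4, "#b07219") from by decide]
      unfold pvBest
      simp [List.mem_cons]
      split_ifs <;> simp [pvCombine]
    · have hmk : pvPriority = PySem.Dict.mk
        [(".py", ((0 : Int), "#3776ab")), (".js", (1, "#f7df1e")), (".ts", (1, "#f7df1e")),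
         (".go", (2, "#00add8")), (".rs", (3, "#dea584")), (".java", (4, "#b07219"))] := by decide
      have hnone : PySem.Dict.get? pvPriority x = none := by
        rw [hmk]
        simp [beq_iff_eq, Ne.symm h1, Ne.symm h2, Ne.symm h3,
          Ne.symm h4, Ne.symm h5, Ne.symm h6, PySem.Dict.get?]
      simp only [pvStep, hnone, pvCombine]
      unfold pvBest
      simp [List.mem_cons, Ne.symm h1, Ne.symm h2, Ne.symm h3, Ne.symm h4, Ne.symm h5, Ne.symm h6]

-- ===== VERDICT (by name: the statement is the Claim_ definition above) =====
theorem get_module_color_py_spec : Claim_equal_get_module_color_py := by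
  intro extensions _
  show get_module_color_py extensions = get_module_color_py_alt extensions
  unfold get_module_color_py get_module_color_py_alt
  rw [foldl_pvStep_closed]
  unfold pvBest
  split_ifs with h1 h2 h3 h4 h5 <;> simp_all
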